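-- pv_equiv track=rewrite | github.com/dios2003/education | module2hard_0.py | get_kod
-- ===== SOURCE A (Python) =====
-- def get_kod(n):
--     numbers = list()
--     _list_result = list()
--     for i in range(1, n):
--         numbers.append(i)
--     for i in range(0, len(numbers)):
--         for j in range(i + 1, len(numbers)):
--             if len(numbers) > 1:
--                 _sum_par = numbers[i] + numbers[j]
--                 if n % _sum_par == 0:
--                     _list_result.append(numbers[i])
--                     _list_result.append(numbers[j])
--     return _list_result
-- ===== SOURCE B (Python) =====
-- def get_kod(n):
--     divs = [d for d in range(3, n + 1) if n % d == 0]
--     res = []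
--     for a in range(1, n):
--         for s in divs:
--             if s > 2 * a:
--                 res.append(a)
--                 res.append(s - a)
--     return res
-- ===== Notes on version B (the rewrite author's own statement) =====
-- stated objective: faster
-- what changed: Instead of scanning all O(n^2) ordered pairs (a,b) and testing whether a+b divides n, B computes the list of divisors of n in [3,n] once and, for each first element a, emits (a, d-a) for every divisor d > 2a, which yields the same pairs in the same order.
import Mathlib
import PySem

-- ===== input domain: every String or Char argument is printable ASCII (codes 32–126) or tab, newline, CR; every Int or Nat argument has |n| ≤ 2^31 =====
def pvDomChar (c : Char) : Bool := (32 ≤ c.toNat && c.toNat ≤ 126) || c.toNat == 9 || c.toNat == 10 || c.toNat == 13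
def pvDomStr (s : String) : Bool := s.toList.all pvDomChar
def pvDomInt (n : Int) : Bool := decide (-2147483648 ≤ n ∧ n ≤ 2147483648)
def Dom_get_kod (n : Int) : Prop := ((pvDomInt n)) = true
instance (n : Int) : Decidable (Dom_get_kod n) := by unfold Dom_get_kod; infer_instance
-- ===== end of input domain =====

-- B replaces A's quadratic scan over all pairs by enumerating the divisors of n once and,
-- for each first element a, emitting b = d - a for each divisor d > 2a (objective: faster).

-- ===== PORT A =====
def get_kod (n : Int) : List Int :=
  let numbers : List Int := (PySem.List.pyRange 1 n 1).foldl (fun acc i => acc ++ [i]) []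
  (PySem.List.pyRange 0 (numbers.length : Int) 1).foldl (fun res i =>
    (PySem.List.pyRange (i + 1) (numbers.length : Int) 1).foldl (fun res2 j =>
      if numbers.length > 1 then
        let sumPar := PySem.List.pyGetD numbers i 0 + PySem.List.pyGetD numbers j 0
        if PySem.Int.mod n sumPar == 0 then
          res2 ++ [PySem.List.pyGetD numbers i 0, PySem.List.pyGetD numbers j 0]
        else res2
      else res2) res) []

-- ===== PORT B =====
def get_kod_alt (n : Int) : List Int :=
  let divs : List Int := (PySem.List.pyRange 3 (n + 1) 1).filter (fun d => PySem.Int.mod n d == 0)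
  (PySem.List.pyRange 1 n 1).foldl (fun res a =>
    divs.foldl (fun res2 s =>
      if s > 2 * a then res2 ++ [a, s - a] else res2) res) []

-- ===== PRECONDITION & SPEC =====
def Spec_get_kod (n : Int) (out : List Int) : Prop := out = get_kod_alt n
instance (n : Int) (out : List Int) : Decidable (Spec_get_kod n out) := by unfold Spec_get_kod; infer_instance

-- ===== CLAIM (what is proved, stated in full; the proofs are below) =====
def Claim_equal_get_kod : Prop := ∀ (n : Int), Dom_get_kod n → Spec_get_kod n (get_kod n)

-- ===== LEMMAS AND PROOFS =====

-- the common normal form of both programs: for each a, the b with a < b < n and (a+b) | n, in order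
def innerPairs (n a : Int) : List Int :=
  (PySem.List.pyRange (a + 1) n 1).flatMap
    (fun b => if PySem.Int.mod n (a + b) == 0 then [a, b] else [])

def canon (n : Int) : List Int :=
  (PySem.List.pyRange 1 n 1).flatMap (innerPairs n)

theorem flatMap_ite {α β : Type} (l : List α) (p : α → Prop) [DecidablePred p] (g : α → List β) :
    l.flatMap (fun x => if p x then g x else []) = (l.filter (fun x => decide (p x))).flatMap g := by
  induction l with
  | nil => simp
  | cons x xs ih => by_cases h : p x <;> simp [h, ih]

theorem pairwise_lt_eq_of_mem_iff (l1 l2 : List Int)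
    (s1 : l1.Pairwise (· < ·)) (s2 : l2.Pairwise (· < ·)) (h : ∀ x, x ∈ l1 ↔ x ∈ l2) :
    l1 = l2 :=
  ((List.perm_ext_iff_of_nodup (s1.imp ne_of_lt) (s2.imp ne_of_lt)).mpr h).eq_of_pairwise
    (fun _ _ _ _ h1 h2 => le_antisymm h1 h2) (s1.imp le_of_lt) (s2.imp le_of_lt)

-- key: the shifted filtered divisor list is exactly the b-list
theorem key (n a : Int) (ha : 1 ≤ a) (han : a < n) :
    (((PySem.List.pyRange 3 (n + 1) 1).filter (fun d => PySem.Int.mod n d == 0)).filter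
        (fun s => decide (s > 2 * a))).map (fun s => s - a)
      = (PySem.List.pyRange (a + 1) n 1).filter (fun b => PySem.Int.mod n (a + b) == 0) := by
  apply pairwise_lt_eq_of_mem_iff
  · rw [List.pairwise_map]
    exact (((PySem.List.pairwise_lt_pyRange_one 3 (n+1)).filter _).filter _).imp (fun h => by omega)
  · exact (PySem.List.pairwise_lt_pyRange_one (a+1) n).filter _
  · intro x
    simp only [List.mem_map, List.mem_filter, PySem.List.mem_pyRange_one, beq_iff_eq,
      PySem.Int.mod_eq_zero_iff_dvd, decide_eq_true_eq]
    constructor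
    · rintro ⟨s, ⟨⟨⟨hs3, hsn⟩, hdvd⟩, hgt⟩, rfl⟩
      refine ⟨⟨by omega, ?_⟩, by rw [show a + (s - a) = s by ring]; exact hdvd⟩
      -- s - a < n since s ≤ n (s | n, n > 0) and a ≥ 1
      have hn0 : 0 < n := by omega
      have hsle : s ≤ n := Int.le_of_dvd hn0 hdvd
      omega
    · rintro ⟨⟨hxa, hxn⟩, hdvd⟩
      have hn0 : 0 < n := by omega
      refine ⟨a + x, ⟨⟨⟨by omega, ?_⟩, hdvd⟩, by omega⟩, by ring⟩
      have := Int.le_of_dvd hn0 hdvd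
      omega

theorem get_kod_alt_eq_canon (n : Int) : get_kod_alt n = canon n := by
  unfold get_kod_alt canon
  have hbody : ∀ (a : Int), (fun (res2 : List Int) s =>
      if s > 2 * a then res2 ++ [a, s - a] else res2)
      = (fun res2 s => res2 ++ if s > 2 * a then [a, s - a] else []) := by
    intro a; funext res2 s; split <;> simp
  simp only [hbody, PySem.List.foldl_append_eq_flatMap, List.nil_append]
  apply List.flatMap_congr
  intro a ha
  rw [PySem.List.mem_pyRange_one] at ha
  rw [flatMap_ite _ (fun s => s > 2 * a) (fun s => [a, s - a]),
    ← List.flatMap_map (fun s => s - a) (fun b => [a, b]), key n a ha.1 ha.2]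
  unfold innerPairs
  rw [flatMap_ite _ (fun b => PySem.Int.mod n (a + b) == 0) (fun b => [a, b])]
  simp only [Bool.decide_coe]

theorem pyRange_map_add (c a b : Int) :
    (PySem.List.pyRange a b 1).map (fun x => c + x) = PySem.List.pyRange (c + a) (c + b) 1 := by
  rw [PySem.List.pyRange_one, PySem.List.pyRange_one, List.map_map]
  have h : (c + b - (c + a)).toNat = (b - a).toNat := by omega
  rw [h]
  apply List.map_congr_left; intro k _; simp; ring

theorem pyGetD_pyRange_one_shift (n i : Int) (h0 : 0 ≤ i)
    (h1 : i < ((PySem.List.pyRange 1 n 1).length : Int)) :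
    PySem.List.pyGetD (PySem.List.pyRange 1 n 1) i 0 = 1 + i := by
  rw [PySem.List.pyGetD_eq_getElem _ 0 h0 h1, PySem.List.getElem_pyRange_one]
  omega

theorem outer_reindex (n : Int) :
    PySem.List.pyRange (1 + 0) (1 + ((PySem.List.pyRange 1 n 1).length : Int)) 1
      = PySem.List.pyRange 1 n 1 := by
  rw [PySem.List.length_pyRange_one, PySem.List.pyRange_one, PySem.List.pyRange_one]
  have h : (1 + ((n - 1).toNat : Int) - (1 + 0)).toNat = (n - 1).toNat := by omega
  rw [h]
  apply List.map_congr_left; intro k _; omega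

theorem get_kod_eq_canon (n : Int) : get_kod n = canon n := by
  unfold get_kod
  simp only [PySem.List.foldl_append_singleton_eq_self, List.nil_append]
  have hbody : ∀ (i : Int), (fun (res2 : List Int) j =>
      if (PySem.List.pyRange 1 n 1).length > 1 then
        let sumPar := PySem.List.pyGetD (PySem.List.pyRange 1 n 1) i 0 +
          PySem.List.pyGetD (PySem.List.pyRange 1 n 1) j 0
        if PySem.Int.mod n sumPar == 0 then
          res2 ++ [PySem.List.pyGetD (PySem.List.pyRange 1 n 1) i 0,
            PySem.List.pyGetD (PySem.List.pyRange 1 n 1) j 0]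
        else res2
      else res2)
      = (fun res2 j => res2 ++
        (if (PySem.List.pyRange 1 n 1).length > 1 then
          (if PySem.Int.mod n (PySem.List.pyGetD (PySem.List.pyRange 1 n 1) i 0 +
              PySem.List.pyGetD (PySem.List.pyRange 1 n 1) j 0) == 0 then
            [PySem.List.pyGetD (PySem.List.pyRange 1 n 1) i 0,
             PySem.List.pyGetD (PySem.List.pyRange 1 n 1) j 0]
          else [])
        else [])) := by
    intro i; funext res2 j; split_ifs <;> simp_all
  simp only [hbody, PySem.List.foldl_append_eq_flatMap, List.nil_append]
  have hlen : ((PySem.List.pyRange 1 n 1).length : Int) = ((n - 1).toNat : Int) := by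
    rw [PySem.List.length_pyRange_one]
  -- step 1: replace the index-based inner term by innerPairs n (1 + i), for i in range
  have hstep : (PySem.List.pyRange 0 ((PySem.List.pyRange 1 n 1).length : Int) 1).flatMap
      (fun i => (PySem.List.pyRange (i + 1) ((PySem.List.pyRange 1 n 1).length : Int) 1).flatMap
        (fun j => if (PySem.List.pyRange 1 n 1).length > 1 then
          (if PySem.Int.mod n (PySem.List.pyGetD (PySem.List.pyRange 1 n 1) i 0 +
              PySem.List.pyGetD (PySem.List.pyRange 1 n 1) j 0) == 0 then
            [PySem.List.pyGetD (PySem.List.pyRange 1 n 1) i 0,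
             PySem.List.pyGetD (PySem.List.pyRange 1 n 1) j 0]
          else [])
        else []))
      = (PySem.List.pyRange 0 ((PySem.List.pyRange 1 n 1).length : Int) 1).flatMap
        (fun i => innerPairs n (1 + i)) := by
    apply List.flatMap_congr
    intro i hi
    rw [PySem.List.mem_pyRange_one] at hi
    have hcongr : (PySem.List.pyRange (i + 1) ((PySem.List.pyRange 1 n 1).length : Int) 1).flatMap
        (fun j => if (PySem.List.pyRange 1 n 1).length > 1 then
          (if PySem.Int.mod n (PySem.List.pyGetD (PySem.List.pyRange 1 n 1) i 0 +
              PySem.List.pyGetD (PySem.List.pyRange 1 n 1) j 0) == 0 then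
            [PySem.List.pyGetD (PySem.List.pyRange 1 n 1) i 0,
             PySem.List.pyGetD (PySem.List.pyRange 1 n 1) j 0]
          else [])
        else [])
        = (PySem.List.pyRange (i + 1) ((PySem.List.pyRange 1 n 1).length : Int) 1).flatMap
          (fun j => if PySem.Int.mod n ((1 + i) + (1 + j)) == 0 then [1 + i, 1 + j] else []) := by
      apply List.flatMap_congr
      intro j hj
      rw [PySem.List.mem_pyRange_one] at hj
      have hgi := pyGetD_pyRange_one_shift n i hi.1 (by omega)
      have hgj := pyGetD_pyRange_one_shift n j (by omega) hj.2
      rw [hgi, hgj, if_pos (by omega)]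
    rw [hcongr, ← List.flatMap_map (fun j => 1 + j)
        (fun b => if PySem.Int.mod n ((1 + i) + b) == 0 then [1 + i, b] else []),
      pyRange_map_add]
    unfold innerPairs
    have h1 : (1 : Int) + (i + 1) = (1 + i) + 1 := by ring
    have h2 : (1 : Int) + ((PySem.List.pyRange 1 n 1).length : Int) = n := by
      rw [hlen] at hi ⊢; omega
    rw [h1, h2]
  rw [hstep, ← List.flatMap_map (fun i => 1 + i) (innerPairs n), pyRange_map_add,
    outer_reindex]
  rfl

-- ===== VERDICT (by name: the statement is the Claim_ definition above) =====
theorem get_kod_spec : Claim_equal_get_kod := by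
  intro n _
  unfold Spec_get_kod
  rw [get_kod_eq_canon, get_kod_alt_eq_canon]
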